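-- pv_equiv track=rewrite | github.com/ahsanzunair/aljunaidtech_tasks | MULTI-ROLE SMART APPOINTMENT & MEDICAL RECORD SYSTEM/MediTrack/MediTrackApp/views.py | format_timespan
-- ===== SOURCE A (Python) =====
-- def format_timespan(seconds):
--     """Convert seconds to human readable format."""
--     intervals = (
--         ('weeks', 604800),
--         ('days', 86400),
--         ('hours', 3600),
--         ('minutes', 60),
--         ('seconds', 1),
--     )
--
--     result = []
--     for name, count in intervals:
--         value = seconds // count
--         if value:
--             seconds -= value * count
--             result.append(f"{int(value)} {name}")
--
--     return ', '.join(result[:2]) if result else '0 seconds'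
-- ===== SOURCE B (Python) =====
-- def format_timespan(seconds):
--     """Convert seconds to human readable format.
--
--     Bottom-up divmod chain (peel the smallest unit first via unit ratios
--     60, 60, 24, 7) plus an early-stopping recursive picker of the first
--     two nonzero parts.
--     """
--     q, secs = divmod(seconds, 60)
--     q, mins = divmod(q, 60)
--     q, hrs = divmod(q, 24)
--     weeks, days = divmod(q, 7)
--     parts = _pick([('weeks', weeks), ('days', days), ('hours', hrs),
--                    ('minutes', mins), ('seconds', secs)], 2)
--     return ', '.join(parts) if parts else '0 seconds'
--
--
-- def _pick(pairs, k):
--     """First k entries of pairs with nonzero value, formatted."""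
--     if k == 0 or not pairs:
--         return []
--     (name, v), rest = pairs[0], pairs[1:]
--     if v:
--         return [f"{v} {name}"] + _pick(rest, k - 1)
--     return _pick(rest, k)
-- ===== Notes on version B (the rewrite author's own statement) =====
-- stated objective: alternative
-- what changed: Instead of A's stateful loop subtracting value*count for each of five fixed divisors top-down, B peels units bottom-up with a divmod chain by the unit ratios 60, 60, 24, 7 and selects the first two nonzero parts with an early-stopping recursive picker.
import Mathlib
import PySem

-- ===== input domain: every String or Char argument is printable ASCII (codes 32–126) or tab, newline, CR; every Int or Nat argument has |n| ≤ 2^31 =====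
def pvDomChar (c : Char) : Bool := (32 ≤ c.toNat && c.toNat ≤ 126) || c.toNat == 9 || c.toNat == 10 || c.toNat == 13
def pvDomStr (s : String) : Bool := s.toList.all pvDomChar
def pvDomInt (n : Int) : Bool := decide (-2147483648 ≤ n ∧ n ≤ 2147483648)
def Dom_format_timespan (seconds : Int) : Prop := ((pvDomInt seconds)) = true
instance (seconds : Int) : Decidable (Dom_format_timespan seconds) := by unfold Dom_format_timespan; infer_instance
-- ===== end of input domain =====

-- B replaces A's top-down subtraction loop by a bottom-up divmod chain (unit ratios 60,60,24,7)
-- and an early-stopping recursive picker of the first two nonzero parts (objective: alternative).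

-- ===== PORT A =====
-- the body of A's for-loop: value = seconds // count; if value: seconds -= value*count; result.append(...)
def pvStepA (st : Int × List String) (p : String × Int) : Int × List String :=
  let value := PySem.Int.floordiv st.1 p.2
  if value ≠ 0 then (st.1 - value * p.2, st.2 ++ [PySem.Int.toStr value ++ " " ++ p.1])
  else st

def format_timespan (seconds : Int) : String :=
  let intervals : List (String × Int) :=
    [("weeks", 604800), ("days", 86400), ("hours", 3600), ("minutes", 60), ("seconds", 1)]
  let fin := intervals.foldl pvStepA (seconds, [])
  if fin.2 ≠ [] then PySem.Str.join ", " (PySem.List.slice fin.2 none (some 2)) else "0 seconds"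

-- ===== PORT B =====
-- _pick: first k entries of pairs with nonzero value, formatted
def pvPick : List (String × Int) → Nat → List String
  | _, 0 => []
  | [], _ => []
  | (name, v) :: rest, Nat.succ k =>
      if v ≠ 0 then (PySem.Int.toStr v ++ " " ++ name) :: pvPick rest k
      else pvPick rest (Nat.succ k)

-- divmod(a, c) for the literal positive c is (a // c, a % c); ported with floordiv/mod
def format_timespan_alt (seconds : Int) : String :=
  let q1 := PySem.Int.floordiv seconds 60
  let secs := PySem.Int.mod seconds 60
  let q2 := PySem.Int.floordiv q1 60
  let mins := PySem.Int.mod q1 60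
  let q3 := PySem.Int.floordiv q2 24
  let hrs := PySem.Int.mod q2 24
  let weeks := PySem.Int.floordiv q3 7
  let days := PySem.Int.mod q3 7
  let parts := pvPick [("weeks", weeks), ("days", days), ("hours", hrs),
                       ("minutes", mins), ("seconds", secs)] 2
  if parts ≠ [] then PySem.Str.join ", " parts else "0 seconds"

-- ===== PRECONDITION & SPEC =====
def Spec_format_timespan (seconds : Int) (out : String) : Prop := out = format_timespan_alt seconds
instance (seconds : Int) (out : String) : Decidable (Spec_format_timespan seconds out) := by unfold Spec_format_timespan; infer_instance

-- ===== CLAIM (what is proved, stated in full; the proofs are below) =====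
def Claim_equal_format_timespan : Prop := ∀ (seconds : Int), Dom_format_timespan seconds → Spec_format_timespan seconds (format_timespan seconds)

-- ===== LEMMAS AND PROOFS =====

-- A's loop step in closed form: the new running value is st.1 mod count, the append is conditional.
theorem pvStepA_eq (st : Int × List String) (p : String × Int) :
    pvStepA st p = (PySem.Int.mod st.1 p.2,
      st.2 ++ (if PySem.Int.floordiv st.1 p.2 = 0 then []
               else [PySem.Int.toStr (PySem.Int.floordiv st.1 p.2) ++ " " ++ p.1])) := by
  have h := PySem.Int.floordiv_mul_add_mod st.1 p.2
  unfold pvStepA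
  by_cases hv : PySem.Int.floordiv st.1 p.2 = 0
  · rw [hv] at h
    simp only [zero_mul, zero_add] at h
    simp [hv, h]
  · simp [hv]
    omega

-- ===== VERDICT (by name: the statement is the Claim_ definition above) =====
theorem format_timespan_spec : Claim_equal_format_timespan := by
  intro s _
  unfold Spec_format_timespan format_timespan format_timespan_alt
  simp only [List.foldl, pvStepA_eq]
  simp only [PySem.Int.floordiv_eq_ediv_of_pos (b := 604800) (by norm_num),
             PySem.Int.floordiv_eq_ediv_of_pos (b := 86400) (by norm_num),
             PySem.Int.floordiv_eq_ediv_of_pos (b := 3600) (by norm_num),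
             PySem.Int.floordiv_eq_ediv_of_pos (b := 60) (by norm_num),
             PySem.Int.floordiv_eq_ediv_of_pos (b := 24) (by norm_num),
             PySem.Int.floordiv_eq_ediv_of_pos (b := 7) (by norm_num),
             PySem.Int.floordiv_eq_ediv_of_pos (b := 1) (by norm_num),
             PySem.Int.mod_eq_emod_of_pos (b := 604800) (by norm_num),
             PySem.Int.mod_eq_emod_of_pos (b := 86400) (by norm_num),
             PySem.Int.mod_eq_emod_of_pos (b := 3600) (by norm_num),
             PySem.Int.mod_eq_emod_of_pos (b := 60) (by norm_num),
             PySem.Int.mod_eq_emod_of_pos (b := 24) (by norm_num),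
             PySem.Int.mod_eq_emod_of_pos (b := 7) (by norm_num)]
  have h1 : s / 60 % 60 = s % 3600 / 60 := by omega
  have h2 : s / 60 / 60 % 24 = s % 86400 / 3600 := by omega
  have h3 : s / 60 / 60 / 24 % 7 = s % 604800 / 86400 := by omega
  have h4 : s / 60 / 60 / 24 / 7 = s / 604800 := by omega
  simp only [h1, h2, h3, h4, Int.ediv_one]
  by_cases c1 : s / 604800 = 0 <;>
  by_cases c2 : s % 604800 / 86400 = 0 <;>
  by_cases c3 : s % 86400 / 3600 = 0 <;>
  by_cases c4 : s % 3600 / 60 = 0 <;>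
  by_cases c5 : s % 60 = 0 <;>
  simp [c1, c2, c3, c4, c5, pvPick, PySem.List.slice]
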